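-- pv_equiv track=rewrite | github.com/DanilodeMelo-coder/gym-management-api | services/aluno_services.py | verificar_cpf
-- ===== SOURCE A (Python) =====
-- def verificar_cpf(cpf):
--
--     cpf = cpf.replace(".", "").replace("-","")
--
--     if len(cpf) != 11 or cpf == cpf[0] * 11:
--         return False
--
--     soma = sum(int(cpf[i]) * (10 - i) for i in range (9))
--     digito1 = (soma * 10 % 11) % 10
--
--     if digito1 != int(cpf[9]):
--         return False
--
--
--     soma = sum(int(cpf[i]) * (11 - i) for i in range (10))
--     digito2 = (soma * 10 % 11) % 10
--
--     if digito2 != int(cpf[10]):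
--         return False
--
--     return True
-- ===== SOURCE B (Python) =====
-- def verificar_cpf(cpf):
--     cpf = cpf.replace(".", "").replace("-", "")
--
--     if len(cpf) != 11 or cpf == cpf[0] * 11:
--         return False
--
--     # Prefix-sum (pencil-and-paper) method: summing the running total once per
--     # step gives each digit a weight equal to the number of remaining steps, so
--     # no index multiplications are needed; the second check sum is derived from
--     # the same two accumulators instead of a second weighted pass.
--     t = s = 0
--     for ch in cpf[:9]:
--         t += int(ch)
--         s += t
--
--     d9 = int(cpf[9])
--     if d9 != (s + t) * 10 % 11 % 10:
--         return False
--
--     d10 = int(cpf[10])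
--     return d10 == (s + 2 * t + 2 * d9) * 10 % 11 % 10
-- ===== Notes on version B (the rewrite author's own statement) =====
-- stated objective: alternative
-- what changed: B computes the check sums by the pencil-and-paper prefix-sum method (adding a running total once per step instead of multiplying each digit by its index weight) in a single pass over the first 9 digits, and derives the second check sum from the same two accumulators instead of a second weighted pass.
-- outside the precondition, e.g. on verificar_cpf('1111111112X'): A returns False, B returns False
import Mathlib
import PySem

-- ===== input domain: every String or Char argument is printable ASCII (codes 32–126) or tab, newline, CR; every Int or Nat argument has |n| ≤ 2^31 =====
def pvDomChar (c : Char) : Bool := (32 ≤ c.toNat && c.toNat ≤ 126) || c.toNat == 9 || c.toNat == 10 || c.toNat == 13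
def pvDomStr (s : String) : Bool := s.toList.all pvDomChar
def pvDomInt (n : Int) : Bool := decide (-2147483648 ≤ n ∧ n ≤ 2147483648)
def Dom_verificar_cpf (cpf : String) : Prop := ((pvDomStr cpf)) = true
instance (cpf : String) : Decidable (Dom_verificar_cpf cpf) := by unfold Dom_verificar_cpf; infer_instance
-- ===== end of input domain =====

-- B computes the check sums by the prefix-sum method (running total added once per step, no
-- index multiplications) and derives the second check sum from the first pass's accumulators
-- (alternative decomposition, same cost).

-- ===== PORT A =====
-- int(cpf[i]) : IndexError/ValueError become none
def pvDigitAt? (l : List Char) (i : Int) : Option Int :=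
  match PySem.List.pyGet? l i with
  | some c => PySem.Int.ofChars? [c]
  | none => none

def verificar_cpf (cpf : String) : Bool :=
  -- cpf = cpf.replace(".", "").replace("-", "")
  let l := PySem.Chars.replace (PySem.Chars.replace cpf.toList ['.'] []) ['-'] []
  if l.length ≠ 11 then false
  else
    match l with
    | [] => false  -- unreachable: length is 11
    | c0 :: _ =>
      if l = List.replicate 11 c0 then false
      else
        -- soma = sum(int(cpf[i]) * (10 - i) for i in range(9))
        let soma? := (PySem.List.pyRange 0 9 1).foldl (fun acc i =>
          match acc, pvDigitAt? l i with
          | some a, some d => some (a + d * (10 - i))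
          | _, _ => none) (some 0)
        match soma?, pvDigitAt? l 9 with
        | some soma, some d9 =>
          let digito1 := PySem.Int.mod (PySem.Int.mod (soma * 10) 11) 10
          if digito1 ≠ d9 then false
          else
            -- soma = sum(int(cpf[i]) * (11 - i) for i in range(10))
            let soma2? := (PySem.List.pyRange 0 10 1).foldl (fun acc i =>
              match acc, pvDigitAt? l i with
              | some a, some d => some (a + d * (11 - i))
              | _, _ => none) (some 0)
            match soma2?, pvDigitAt? l 10 with
            | some soma2, some d10 =>
              let digito2 := PySem.Int.mod (PySem.Int.mod (soma2 * 10) 11) 10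
              if digito2 ≠ d10 then false else true
            | _, _ => false  -- int() raised: outside Pre_
        | _, _ => false  -- int() raised: outside Pre_

-- ===== PORT B =====
def verificar_cpf_alt (cpf : String) : Bool :=
  let l := PySem.Chars.replace (PySem.Chars.replace cpf.toList ['.'] []) ['-'] []
  if l.length ≠ 11 then false
  else
    match l.head? with
    | none => false  -- unreachable: length is 11
    | some c0 =>
      if l = List.replicate 11 c0 then false
      else
        -- t = s = 0; for ch in cpf[:9]: t += int(ch); s += t      (none: int() raised, outside Pre_)
        let st? := (PySem.List.slice l (some 0) (some 9)).foldl
          (fun acc ch => acc.bind fun (p : Int × Int) =>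
            (PySem.Int.ofChars? [ch]).map fun d => (p.1 + d, p.2 + p.1 + d)) (some ((0 : Int), (0 : Int)))
        match st? with
        | none => false
        | some (t, s) =>
          match pvDigitAt? l 9 with
          | none => false
          | some d9 =>
            if d9 ≠ PySem.Int.mod (PySem.Int.mod ((s + t) * 10) 11) 10 then false
            else
              match pvDigitAt? l 10 with
              | none => false
              | some d10 =>
                d10 == PySem.Int.mod (PySem.Int.mod ((s + 2 * t + 2 * d9) * 10) 11) 10

-- ===== PRECONDITION & SPEC =====
-- Pre_ excludes strings that normalize to 11 non-identical chars containing a non-digit: A (and B at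
-- the same point of the scan) raises ValueError on them, except when the only non-digit is at
-- position 10 and the first check digit already fails, where both A and B return False.
def Pre_verificar_cpf (cpf : String) : Prop :=
  let l := PySem.Chars.replace (PySem.Chars.replace cpf.toList ['.'] []) ['-'] []
  l.length ≠ 11 ∨ l = List.replicate 11 (l.headD ' ') ∨ l.all Char.isDigit = true
instance (cpf : String) : Decidable (Pre_verificar_cpf cpf) := by unfold Pre_verificar_cpf; infer_instance
def pvWitness_verificar_cpf : String := "529.982.247-25"

def Spec_verificar_cpf (cpf : String) (out : Bool) : Prop := out = verificar_cpf_alt cpf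
instance (cpf : String) (out : Bool) : Decidable (Spec_verificar_cpf cpf out) := by unfold Spec_verificar_cpf; infer_instance

-- ===== CLAIM (what is proved, stated in full; the proofs are below) =====
def Claim_equal_verificar_cpf : Prop := ∀ (cpf : String), Dom_verificar_cpf cpf → Pre_verificar_cpf cpf → Spec_verificar_cpf cpf (verificar_cpf cpf)

-- ===== LEMMAS AND PROOFS =====

theorem pv_ofChars_digit (c : Char) (h : c.isDigit = true) :
    PySem.Int.ofChars? [c] = some ((c.toNat : Int) - 48) := by
  have h' : 48 ≤ c.toNat ∧ c.toNat ≤ 57 := by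
    simp [Char.isDigit] at h
    exact ⟨by exact_mod_cast h.1, by exact_mod_cast h.2⟩
  have : c = '0' ∨ c = '1' ∨ c = '2' ∨ c = '3' ∨ c = '4' ∨ c = '5' ∨ c = '6' ∨ c = '7' ∨ c = '8' ∨ c = '9' := by
    have hv : c.toNat = 48 ∨ c.toNat = 49 ∨ c.toNat = 50 ∨ c.toNat = 51 ∨ c.toNat = 52 ∨ c.toNat = 53 ∨ c.toNat = 54 ∨ c.toNat = 55 ∨ c.toNat = 56 ∨ c.toNat = 57 := by omega
    rcases hv with h|h|h|h|h|h|h|h|h|h <;>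
      simp only [Char.toNat] at h <;>
      first
      | exact Or.inl (Char.ext (UInt32.toNat_inj.mp h))
      | exact Or.inr (Or.inl (Char.ext (UInt32.toNat_inj.mp h)))
      | exact Or.inr (Or.inr (Or.inl (Char.ext (UInt32.toNat_inj.mp h))))
      | exact Or.inr (Or.inr (Or.inr (Or.inl (Char.ext (UInt32.toNat_inj.mp h)))))
      | exact Or.inr (Or.inr (Or.inr (Or.inr (Or.inl (Char.ext (UInt32.toNat_inj.mp h))))))
      | exact Or.inr (Or.inr (Or.inr (Or.inr (Or.inr (Or.inl (Char.ext (UInt32.toNat_inj.mp h)))))))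
      | exact Or.inr (Or.inr (Or.inr (Or.inr (Or.inr (Or.inr (Or.inl (Char.ext (UInt32.toNat_inj.mp h))))))))
      | exact Or.inr (Or.inr (Or.inr (Or.inr (Or.inr (Or.inr (Or.inr (Or.inl (Char.ext (UInt32.toNat_inj.mp h)))))))))
      | exact Or.inr (Or.inr (Or.inr (Or.inr (Or.inr (Or.inr (Or.inr (Or.inr (Or.inl (Char.ext (UInt32.toNat_inj.mp h))))))))))
      | exact Or.inr (Or.inr (Or.inr (Or.inr (Or.inr (Or.inr (Or.inr (Or.inr (Or.inr (Char.ext (UInt32.toNat_inj.mp h))))))))))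
  rcases this with h|h|h|h|h|h|h|h|h|h <;> subst h <;> decide

-- ===== VERDICT (by name: the statement is the Claim_ definition above) =====
theorem verificar_cpf_spec : Claim_equal_verificar_cpf := by
  intro cpf _ hpre
  unfold Spec_verificar_cpf verificar_cpf verificar_cpf_alt
  unfold Pre_verificar_cpf at hpre
  set l := PySem.Chars.replace (PySem.Chars.replace cpf.toList ['.'] []) ['-'] [] with hl
  clear_value l
  by_cases hlen : l.length = 11
  · rcases l with _ | ⟨c0, l⟩
    · simp at hlen
    by_cases hrep : c0 :: l = List.replicate 11 c0
    · simp [hrep]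
    · have hall : (c0 :: l).all Char.isDigit = true := by
        rcases hpre with h | h | h
        · omega
        · exact absurd (by simpa using h) hrep
        · exact h
      rcases l with _ | ⟨c1, l⟩; · simp at hlen
      rcases l with _ | ⟨c2, l⟩; · simp at hlen
      rcases l with _ | ⟨c3, l⟩; · simp at hlen
      rcases l with _ | ⟨c4, l⟩; · simp at hlen
      rcases l with _ | ⟨c5, l⟩; · simp at hlen
      rcases l with _ | ⟨c6, l⟩; · simp at hlen
      rcases l with _ | ⟨c7, l⟩; · simp at hlen
      rcases l with _ | ⟨c8, l⟩; · simp at hlen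
      rcases l with _ | ⟨c9, l⟩; · simp at hlen
      rcases l with _ | ⟨c10, l⟩; · simp at hlen
      rcases l with _ | ⟨c11, l⟩; swap; · simp at hlen
      simp only [List.all_cons, List.all_nil, Bool.and_eq_true] at hall
      obtain ⟨h0, h1, h2, h3, h4, h5, h6, h7, h8, h9, h10, -⟩ := hall
      have hr9 : PySem.List.pyRange 0 9 1 = [0,1,2,3,4,5,6,7,8] := by decide
      have hr10 : PySem.List.pyRange 0 10 1 = [0,1,2,3,4,5,6,7,8,9] := by decide
      have hsl : PySem.List.slice [c0,c1,c2,c3,c4,c5,c6,c7,c8,c9,c10] (some 0) (some 9)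
          = [c0,c1,c2,c3,c4,c5,c6,c7,c8] := by
        rw [show ((0 : Int)) = ((0 : Nat) : Int) by norm_num,
            show ((9 : Int)) = ((9 : Nat) : Int) by norm_num,
            PySem.List.slice_natCast]
        rfl
      simp [hr9, hr10, hsl, List.foldl, pvDigitAt?, PySem.List.pyGet?, PySem.List.pyIdx?,
        pv_ofChars_digit _ h0, pv_ofChars_digit _ h1, pv_ofChars_digit _ h2,
        pv_ofChars_digit _ h3, pv_ofChars_digit _ h4, pv_ofChars_digit _ h5,
        pv_ofChars_digit _ h6, pv_ofChars_digit _ h7, pv_ofChars_digit _ h8,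
        pv_ofChars_digit _ h9, pv_ofChars_digit _ h10, Option.bind, Option.map, Bool.beq_eq_decide_eq]
      set e0 := ((c0.toNat : Int) - 48)
      set e1 := ((c1.toNat : Int) - 48)
      set e2 := ((c2.toNat : Int) - 48)
      set e3 := ((c3.toNat : Int) - 48)
      set e4 := ((c4.toNat : Int) - 48)
      set e5 := ((c5.toNat : Int) - 48)
      set e6 := ((c6.toNat : Int) - 48)
      set e7 := ((c7.toNat : Int) - 48)
      set e8 := ((c8.toNat : Int) - 48)
      set e9 := ((c9.toNat : Int) - 48)
      set e10 := ((c10.toNat : Int) - 48)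
      ring_nf
      congr 1
      congr 1 <;> exact decide_eq_decide.mpr eq_comm
  · simp [hlen]
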